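-- pv_equiv track=rewrite | github.com/HobbesTheComputerScientist/mock-trial-ai | app.py | extract_witness_statement
-- ===== SOURCE A (Python) =====
-- def extract_witness_statement(case_text, witness_name):
--     """
--     Extract ONLY the specific witness's statement from the case packet.
--     """
--     lines = case_text.split('\n')
--     witness_statement = []
--     capturing = False
--
--     witness_variations = [
--         witness_name.lower(),
--         f"statement of {witness_name.lower()}",
--         f"testimony of {witness_name.lower()}",
--         f"witness: {witness_name.lower()}",
--         f"direct examination of {witness_name.lower()}",
--         f"cross examination of {witness_name.lower()}"
--     ]
--
--     for i, line in enumerate(lines):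
--         line_lower = line.lower()
--
--         if any(var in line_lower for var in witness_variations):
--             capturing = True
--             witness_statement.append(line)
--             continue
--
--         if capturing:
--             stop_phrases = [
--                 "statement of", "testimony of", "witness:",
--                 "direct examination of", "cross examination of",
--                 "exhibit", "stipulation", "charge", "verdict form"
--             ]
--
--             if any(phrase in line_lower for phrase in stop_phrases):
--                 if not any(var in line_lower for var in witness_variations):
--                     break
--
--             witness_statement.append(line)
--
--     result = '\n'.join(witness_statement)
--
--     if len(result) < 100:
--         return case_text[:3000]
--
--     return result[:3000]
-- ===== SOURCE B (Python) =====
-- STOP_PHRASES = ["statement of", "testimony of", "witness:",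
--                 "direct examination of", "cross examination of",
--                 "exhibit", "stipulation", "charge", "verdict form"]
--
--
-- def extract_witness_statement(case_text, witness_name):
--     # Staged passes: build boolean masks over the lines, locate the block
--     # boundaries by index arithmetic, and slice; no scanning loop with a
--     # capturing flag. Every header variation A checks contains the lowered
--     # witness name, so the name mask is a single containment test per line.
--     name = witness_name.lower()
--     lines = case_text.split('\n')
--     lows = [l.lower() for l in lines]
--     name_mask = [name in low for low in lows]
--     try:
--         start = name_mask.index(True)
--     except ValueError:
--         return case_text[:3000]
--     stop_mask = [any(p in low for p in STOP_PHRASES) and not nm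
--                  for low, nm in zip(lows, name_mask)]
--     tail = stop_mask[start + 1:]
--     end = start + 1 + (tail.index(True) if True in tail else len(tail))
--     result = '\n'.join(lines[start:end])
--     if len(result) < 100:
--         return case_text[:3000]
--     return result[:3000]
-- ===== Notes on version B (the rewrite author's own statement) =====
-- stated objective: alternative
-- what changed: Replaces A's single scan with a capturing flag and six-variation any() by staged passes: build per-line lowered/name/stop boolean masks with comprehensions, locate the block boundaries with list.index arithmetic (every header variation A checks contains the lowered name, so the name mask is one containment test per line), and take one list slice lines[start:end]; same fallback to case_text[:3000].
import Mathlib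
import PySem

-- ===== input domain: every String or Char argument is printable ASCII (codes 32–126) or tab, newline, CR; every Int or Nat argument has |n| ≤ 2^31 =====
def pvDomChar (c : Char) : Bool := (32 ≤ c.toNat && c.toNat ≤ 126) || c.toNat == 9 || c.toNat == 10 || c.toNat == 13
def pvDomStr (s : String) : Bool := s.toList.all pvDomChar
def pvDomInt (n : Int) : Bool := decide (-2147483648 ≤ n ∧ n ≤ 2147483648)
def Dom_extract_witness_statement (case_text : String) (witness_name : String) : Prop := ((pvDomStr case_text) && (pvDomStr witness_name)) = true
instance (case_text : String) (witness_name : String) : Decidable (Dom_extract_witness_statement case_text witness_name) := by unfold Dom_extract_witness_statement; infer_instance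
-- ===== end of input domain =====

-- B replaces A's single scan with a capturing flag by staged passes: boolean
-- masks over the lines, boundary indices via .index, and one list slice;
-- objective: simpler decomposition, same return value as A.

-- ===== PORT A =====
-- the six witness_variations of A (each an f-string around witness_name.lower())
def pvVariations (witness_name : String) : List String :=
  [PySem.Str.lower witness_name,
   "statement of " ++ PySem.Str.lower witness_name,
   "testimony of " ++ PySem.Str.lower witness_name,
   "witness: " ++ PySem.Str.lower witness_name,
   "direct examination of " ++ PySem.Str.lower witness_name,
   "cross examination of " ++ PySem.Str.lower witness_name]

-- A's stop_phrases list (also the module constant STOP_PHRASES of Source B)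
def pvStopPhrases : List String :=
  ["statement of", "testimony of", "witness:",
   "direct examination of", "cross examination of",
   "exhibit", "stipulation", "charge", "verdict form"]

-- A's for-loop: state (witness_statement, capturing); break returns the accumulator
def pvALoop (vars : List String) (lines : List String) (acc : List String) (cap : Bool) : List String :=
  match lines with
  | [] => acc
  | l :: ls =>
    let low := PySem.Str.lower l
    if vars.any (fun v => PySem.Str.isIn v low) then
      pvALoop vars ls (acc ++ [l]) true
    else if cap then
      if pvStopPhrases.any (fun p => PySem.Str.isIn p low) then
        if !(vars.any (fun v => PySem.Str.isIn v low)) then acc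
        else pvALoop vars ls (acc ++ [l]) cap
      else pvALoop vars ls (acc ++ [l]) cap
    else pvALoop vars ls acc cap

def extract_witness_statement (case_text : String) (witness_name : String) : String :=
  let lines := (PySem.Str.split? case_text "\n").getD []   -- '\n' ≠ "": split? is always some here
  let ws := pvALoop (pvVariations witness_name) lines [] false
  let result := PySem.Str.join "\n" ws
  if PySem.Str.len result < 100 then PySem.Str.slice case_text none (some 3000)
  else PySem.Str.slice result none (some 3000)

-- ===== PORT B =====
def extract_witness_statement_alt (case_text : String) (witness_name : String) : String :=
  let name := PySem.Str.lower witness_name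
  let lines := (PySem.Str.split? case_text "\n").getD []
  let lows := lines.map PySem.Str.lower
  let nameMask := lows.map (fun low => PySem.Str.isIn name low)
  match PySem.List.index? nameMask true with   -- name_mask.index(True); ValueError → fallback
  | none => PySem.Str.slice case_text none (some 3000)
  | some start =>
    let stopMask := (lows.zip nameMask).map
      (fun p => pvStopPhrases.any (fun q => PySem.Str.isIn q p.1) && !p.2)
    let tail := PySem.List.slice stopMask (some ((start : Int) + 1)) none
    let endIdx := start + 1 +
      (match PySem.List.index? tail true with | some j => j | none => tail.length)
    let result := PySem.Str.join "\n"
      (PySem.List.slice lines (some (start : Int)) (some (endIdx : Int)))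
    if PySem.Str.len result < 100 then PySem.Str.slice case_text none (some 3000)
    else PySem.Str.slice result none (some 3000)

-- ===== PRECONDITION & SPEC =====
def Spec_extract_witness_statement (case_text : String) (witness_name : String) (out : String) : Prop := out = extract_witness_statement_alt case_text witness_name
instance (case_text : String) (witness_name : String) (out : String) : Decidable (Spec_extract_witness_statement case_text witness_name out) := by unfold Spec_extract_witness_statement; infer_instance

-- ===== CLAIM =====
def Claim_equal_extract_witness_statement : Prop := ∀ (case_text : String) (witness_name : String), Dom_extract_witness_statement case_text witness_name → Spec_extract_witness_statement case_text witness_name (extract_witness_statement case_text witness_name)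

-- ===== LEMMAS AND PROOFS =====

-- the per-line predicates: name containment and "stop phrase without the name"
def pvP (v l : String) : Bool := PySem.Str.isIn v (PySem.Str.lower l)
def pvS (v l : String) : Bool :=
  pvStopPhrases.any (fun p => PySem.Str.isIn p (PySem.Str.lower l)) && !(pvP v l)

-- proof-side description of A: first matching line and the block after it
def pvFind (v : String) : List String → Option (String × List String)
  | [] => none
  | l :: ls => if pvP v l then some (l, ls) else pvFind v ls

def pvCollect (v : String) : List String → List String
  | [] => []
  | l :: ls => if pvS v l then [] else l :: pvCollect v ls

-- every variation contains the lowered name, so the six-way any() is one containment test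
lemma pv_any_var_iff (witness_name low : String) :
    (pvVariations witness_name).any (fun v => PySem.Str.isIn v low)
      = PySem.Str.isIn (PySem.Str.lower witness_name) low := by
  set v := PySem.Str.lower witness_name with hv
  have key : ∀ p : String, PySem.Str.isIn (p ++ v) low = true → PySem.Str.isIn v low = true := by
    intro p h
    rw [PySem.Str.isIn_iff_infix] at h ⊢
    have : v.toList <:+: (p ++ v).toList := by
      rw [String.toList_append]; exact (List.suffix_append p.toList v.toList).isInfix
    exact this.trans h
  simp only [pvVariations, List.any_cons, List.any_nil, Bool.or_false, ← hv]
  cases h0 : PySem.Str.isIn v low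
  · simp only [Bool.false_or]
    cases h1 : PySem.Str.isIn ("statement of " ++ v) low
    case true => exact absurd (key _ h1) (by rw [h0]; exact Bool.false_ne_true)
    cases h2 : PySem.Str.isIn ("testimony of " ++ v) low
    case true => exact absurd (key _ h2) (by rw [h0]; exact Bool.false_ne_true)
    cases h3 : PySem.Str.isIn ("witness: " ++ v) low
    case true => exact absurd (key _ h3) (by rw [h0]; exact Bool.false_ne_true)
    cases h4 : PySem.Str.isIn ("direct examination of " ++ v) low
    case true => exact absurd (key _ h4) (by rw [h0]; exact Bool.false_ne_true)
    cases h5 : PySem.Str.isIn ("cross examination of " ++ v) low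
    case true => exact absurd (key _ h5) (by rw [h0]; exact Bool.false_ne_true)
    rfl
  · simp

-- A's loop in the capturing state appends exactly the collected block
lemma pv_aloop_true (witness_name : String) (ls acc : List String) :
    pvALoop (pvVariations witness_name) ls acc true
      = acc ++ pvCollect (PySem.Str.lower witness_name) ls := by
  induction ls generalizing acc with
  | nil => simp [pvALoop, pvCollect]
  | cons l t ih =>
    rw [pvALoop, pvCollect]
    simp only [pv_any_var_iff]
    cases hv : pvP (PySem.Str.lower witness_name) l
    · simp only [pvP] at hv
      simp only [Bool.false_eq_true, if_false, if_true, pvS, pvP, hv, Bool.not_false,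
        Bool.and_true]
      cases hs : pvStopPhrases.any (fun p => PySem.Str.isIn p (PySem.Str.lower l))
      · simpa using ih (acc ++ [l])
      · simp
    · simp only [pvP] at hv
      simp only [if_true, pvS, pvP, hv, Bool.not_true, Bool.and_false,
        Bool.false_eq_true, if_false]
      simpa using ih (acc ++ [l])

-- A's loop before capturing searches for the first name line, then collects
lemma pv_aloop_false (witness_name : String) (ls acc : List String) :
    pvALoop (pvVariations witness_name) ls acc false
      = match pvFind (PySem.Str.lower witness_name) ls with
        | none => acc
        | some (l, rest) => acc ++ l :: pvCollect (PySem.Str.lower witness_name) rest := by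
  induction ls generalizing acc with
  | nil => simp [pvALoop, pvFind]
  | cons l t ih =>
    rw [pvALoop, pvFind]
    simp only [pv_any_var_iff]
    cases hv : pvP (PySem.Str.lower witness_name) l
    · simp only [pvP] at hv
      simp only [hv, Bool.false_eq_true, if_false]
      simpa [pvP, hv] using ih acc
    · simp only [pvP] at hv
      simp only [hv, if_true]
      rw [pv_aloop_true]
      simp

-- the search described by pvFind is exactly name_mask.index(True)
lemma pv_find_index (v : String) (L : List String) :
    pvFind v L
      = match PySem.List.index? (L.map (pvP v)) true with
        | none => none
        | some k => some (L.getD k "", L.drop (k + 1)) := by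
  induction L with
  | nil => simp [pvFind, PySem.List.index?]
  | cons l t ih =>
    rw [pvFind]
    cases hv : pvP v l
    · rw [List.map_cons, hv,
        PySem.List.index?_cons_of_ne _ (show (false : Bool) ≠ true by decide)]
      simp only [Bool.false_eq_true, if_false, ih]
      cases h : PySem.List.index? (t.map (pvP v)) true with
      | none => simp
      | some k => simp [List.getD]
    · rw [List.map_cons, hv, PySem.List.index?_cons_self]
      simp [List.getD]

-- the block described by pvCollect is exactly the slice up to the first stop line
lemma pv_collect_take (v : String) (L : List String) :
    pvCollect v L
      = L.take (match PySem.List.index? (L.map (pvS v)) true with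
                | some j => j | none => (L.map (pvS v)).length) := by
  induction L with
  | nil => simp [pvCollect, PySem.List.index?]
  | cons l t ih =>
    rw [pvCollect]
    cases hs : pvS v l
    · rw [List.map_cons, hs,
        PySem.List.index?_cons_of_ne _ (show (false : Bool) ≠ true by decide)]
      simp only [Bool.false_eq_true, if_false, ih]
      cases h : PySem.List.index? (t.map (pvS v)) true with
      | none => simp
      | some k => simp
    · rw [List.map_cons, hs, PySem.List.index?_cons_self]
      simp

-- the zip-of-masks comprehension of B is the single map of pvS
lemma pv_stopmask (v : String) (L : List String) :
    ((L.map PySem.Str.lower).zip (L.map (pvP v))).map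
      (fun p => pvStopPhrases.any (fun q => PySem.Str.isIn q p.1) && !p.2)
      = L.map (pvS v) := by
  induction L with
  | nil => simp
  | cons l t ih =>
    simp only [List.map_cons, List.zip_cons_cons]
    rw [ih]
    simp [pvS, pvP]

-- ===== VERDICT =====
theorem extract_witness_statement_spec : Claim_equal_extract_witness_statement := by
  intro case_text witness_name _
  unfold Spec_extract_witness_statement
  simp only [extract_witness_statement, extract_witness_statement_alt]
  have hmask : List.map (fun low => PySem.Str.isIn (PySem.Str.lower witness_name) low)
      (List.map PySem.Str.lower ((PySem.Str.split? case_text "\n").getD []))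
      = List.map (pvP (PySem.Str.lower witness_name))
          ((PySem.Str.split? case_text "\n").getD []) := by
    simp [pvP]
  rw [pv_aloop_false, pv_find_index, hmask, pv_stopmask]
  set v := PySem.Str.lower witness_name with hv
  set L := (PySem.Str.split? case_text "\n").getD [] with hLdef
  cases hidx : PySem.List.index? (List.map (pvP v) L) true with
  | none => simp
  | some k =>
    simp only [List.nil_append]
    obtain ⟨hk, -, -⟩ := PySem.List.getElem_of_index?_eq_some hidx
    rw [List.length_map] at hk
    have hdropk : L.drop k = L[k] :: L.drop (k + 1) := List.drop_eq_getElem_cons hk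
    have htail : PySem.List.slice (L.map (pvS v)) (some ((k : Int) + 1)) none
        = (L.drop (k + 1)).map (pvS v) := by
      have hc : ((k : Int) + 1) = ((k + 1 : Nat) : Int) := by push_cast; ring
      rw [hc, PySem.List.slice_from_natCast, List.map_drop]
    rw [htail, pv_collect_take]
    set jv := (match PySem.List.index? ((L.drop (k + 1)).map (pvS v)) true with
               | some j => j | none => ((L.drop (k + 1)).map (pvS v)).length) with hjv
    have hslice : PySem.List.slice L (some (k : Int)) (some ((k + 1 + jv : Nat) : Int))
        = L[k] :: (L.drop (k + 1)).take jv := by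
      rw [PySem.List.slice_natCast, hdropk]
      have h1 : k + 1 + jv - k = jv + 1 := by omega
      rw [h1, List.take_succ_cons]
    rw [hslice]
    simp [List.getD_eq_getElem?_getD, hk]
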